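-- pv_equiv track=rewrite | github.com/nkzarrabi/Code-Exercises | aoc-2024/Day_19/d19_p2.py | count_design_arrangements
-- ===== SOURCE A (Python) =====
-- def count_design_arrangements(towel_patterns, designs):
--     # Convert towel patterns into a set for fast lookup
--     towel_set = set(towel_patterns)
--
--     def count_ways_to_form(design):
--         # Use memoization to store results for substrings
--         memo = {}
--
--         def dfs(remaining):
--             if remaining in memo:
--                 return memo[remaining]
--             if remaining == "":
--                 return 1  # 1 way to form an empty string
--             total_ways = 0
--             for i in range(1, len(remaining) + 1):
--                 if remaining[:i] in towel_set:
--                     total_ways += dfs(remaining[i:])  # Explore the remaining substring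
--             memo[remaining] = total_ways
--             return total_ways
--
--         return dfs(design)
--
--     # Count the total ways for all designs
--     total_ways = 0
--     for design in designs:
--         total_ways += count_ways_to_form(design)
--
--     return total_ways
-- ===== SOURCE B (Python) =====
-- def count_design_arrangements(towel_patterns, designs):
--     towel_set = set(towel_patterns)
--
--     def tail_counts(suffix):
--         # counts[k] = number of ways to tile suffix[k:], built bottom-up by
--         # structural recursion on the suffix (no memo dict needed)
--         if suffix == "":
--             return [1]
--         counts = tail_counts(suffix[1:])
--         ways = 0
--         for l in range(1, len(suffix) + 1):
--             if suffix[:l] in towel_set: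
--                 ways += counts[l - 1]
--         return [ways] + counts
--
--     return sum(tail_counts(design)[0] for design in designs)
-- ===== Notes on version B (the rewrite author's own statement) =====
-- stated objective: alternative
-- what changed: Replaces A's memoized top-down recursion (a per-design dict keyed by suffix strings, recomputed via hashing) with a bottom-up structural recursion over the suffix that returns the whole list of suffix counts, so no memo dict and no repeated-suffix lookup logic is needed.
import Mathlib
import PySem

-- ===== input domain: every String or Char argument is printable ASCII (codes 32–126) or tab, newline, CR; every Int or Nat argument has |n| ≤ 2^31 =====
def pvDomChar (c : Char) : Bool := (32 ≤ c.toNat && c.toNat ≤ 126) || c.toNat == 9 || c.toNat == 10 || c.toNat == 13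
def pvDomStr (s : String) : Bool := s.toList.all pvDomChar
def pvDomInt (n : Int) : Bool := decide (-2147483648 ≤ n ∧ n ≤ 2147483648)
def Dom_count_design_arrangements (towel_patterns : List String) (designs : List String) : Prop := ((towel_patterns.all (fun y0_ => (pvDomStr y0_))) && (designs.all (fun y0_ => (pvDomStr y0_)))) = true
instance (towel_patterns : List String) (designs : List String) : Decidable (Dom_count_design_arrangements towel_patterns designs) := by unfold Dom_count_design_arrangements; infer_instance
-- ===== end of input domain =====

-- B replaces A's memoized top-down recursion (a per-design dict keyed by suffix strings) by a
-- bottom-up structural recursion over the suffix that returns the whole list of suffix counts;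
-- same results, no memo dict (objective: alternative).

-- ===== PORT A =====
-- A's inner `dfs` recurses on strictly shorter suffixes; `fuel` (called with the design's length)
-- is only a termination guard and is never exhausted on the inputs A reaches.
mutual
def pvDfsA (ts : PySem.Set String) : Nat → PySem.Dict String Int → String → Int × PySem.Dict String Int
  | fuel, memo, remaining =>
    match memo.get? remaining with
    | some v => (v, memo)
    | none =>
      if remaining = "" then (1, memo)
      else
        match fuel with
        | 0 => (0, memo)      -- unreachable: fuel ≥ |remaining| at every call
        | fuel' + 1 =>
          let r := pvDfsALoop ts fuel' remaining
            (PySem.List.pyRange 1 ((remaining.toList.length : Int) + 1) 1) 0 memo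
          (r.1, r.2.insert remaining r.1)
  termination_by fuel _ _ => (fuel, 0)

def pvDfsALoop (ts : PySem.Set String) (fuel' : Nat) (remaining : String) :
    List Int → Int → PySem.Dict String Int → Int × PySem.Dict String Int
  | [], total, memo => (total, memo)
  | i :: rest, total, memo =>
    if PySem.Set.contains ts (PySem.Str.slice remaining none (some i)) then
      let p := pvDfsA ts fuel' memo (PySem.Str.slice remaining (some i) none)
      pvDfsALoop ts fuel' remaining rest (total + p.1) p.2
    else
      pvDfsALoop ts fuel' remaining rest total memo
  termination_by is _ _ => (fuel', is.length + 1)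
end

def count_design_arrangements (towel_patterns : List String) (designs : List String) : Int :=
  let towel_set := PySem.Set.ofList towel_patterns
  designs.foldl
    (fun total design => total + (pvDfsA towel_set design.toList.length PySem.Dict.empty design).1) 0

-- ===== PORT B =====
-- Source B's `tail_counts` recurses on the suffix string; ported on the suffix's character list
-- (suffix[1:] = the tail, suffix[:l] = take; exact under the List-Char string semantics).
def pvTailCounts (ts : PySem.Set String) : List Char → List Int
  | [] => [1]
  | c :: rest =>
    let counts := pvTailCounts ts rest
    let ways := (PySem.List.pyRange 1 (((c :: rest).length : Int) + 1) 1).foldl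
      (fun acc l =>
        if PySem.Set.contains ts (String.ofList (PySem.List.slice (c :: rest) none (some l))) then
          acc + (PySem.List.pyGet? counts (l - 1)).getD 0
        else acc) 0
    ways :: counts

def count_design_arrangements_alt (towel_patterns : List String) (designs : List String) : Int :=
  let towel_set := PySem.Set.ofList towel_patterns
  (designs.map (fun design => (pvTailCounts towel_set design.toList).headD 0)).sum

-- ===== PRECONDITION & SPEC =====
def Spec_count_design_arrangements (towel_patterns : List String) (designs : List String) (out : Int) : Prop := out = count_design_arrangements_alt towel_patterns designs
instance (towel_patterns : List String) (designs : List String) (out : Int) : Decidable (Spec_count_design_arrangements towel_patterns designs out) := by unfold Spec_count_design_arrangements; infer_instance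

-- ===== CLAIM (what is proved, stated in full; the proofs are below) =====
def Claim_equal_count_design_arrangements : Prop := ∀ (towel_patterns : List String) (designs : List String), Dom_count_design_arrangements towel_patterns designs → Spec_count_design_arrangements towel_patterns designs (count_design_arrangements towel_patterns designs)

-- ===== LEMMAS AND PROOFS =====

-- The common specification: pvW ts cs = number of ways to write cs as a concatenation of
-- nonempty prefixes whose strings are in ts (fuel-indexed, then closed at fuel = length).
def pvWf (ts : PySem.Set String) : Nat → List Char → Int
  | _, [] => 1
  | 0, _ :: _ => 0
  | fuel + 1, c :: rest =>
    ((List.range (c :: rest).length).map (fun j =>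
      if PySem.Set.contains ts (String.ofList ((c :: rest).take (j + 1))) then
        pvWf ts fuel ((c :: rest).drop (j + 1))
      else 0)).sum

def pvW (ts : PySem.Set String) (cs : List Char) : Int := pvWf ts cs.length cs

theorem pvWf_irrel (ts : PySem.Set String) :
    ∀ (fuel fuel' : Nat) (cs : List Char), cs.length ≤ fuel → cs.length ≤ fuel' →
      pvWf ts fuel cs = pvWf ts fuel' cs := by
  intro fuel
  induction fuel with
  | zero =>
    intro fuel' cs h _
    cases cs with
    | nil => cases fuel' <;> rfl
    | cons c rest => simp at h
  | succ f ih =>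
    intro fuel' cs h h'
    cases cs with
    | nil => cases fuel' <;> rfl
    | cons c rest =>
      cases fuel' with
      | zero => simp at h'
      | succ f' =>
        simp only [pvWf]
        congr 1
        apply List.map_congr_left
        intro j hj
        simp only [List.mem_range] at hj
        by_cases hc : PySem.Set.contains ts (String.ofList ((c :: rest).take (j + 1))) = true
        · rw [if_pos hc, if_pos hc]
          apply ih
          · simp only [List.length_drop, List.length_cons]
            simp only [List.length_cons] at h hj; omega
          · simp only [List.length_drop, List.length_cons]
            simp only [List.length_cons] at h' hj; omega
        · rw [if_neg hc, if_neg hc]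

theorem pvW_cons (ts : PySem.Set String) (c : Char) (rest : List Char) :
    pvW ts (c :: rest) =
      ((List.range (c :: rest).length).map (fun j =>
        if PySem.Set.contains ts (String.ofList ((c :: rest).take (j + 1))) then
          pvW ts ((c :: rest).drop (j + 1))
        else 0)).sum := by
  show pvWf ts (c :: rest).length (c :: rest) = _
  simp only [List.length_cons, pvWf]
  congr 1
  apply List.map_congr_left
  intro j hj
  simp only [List.mem_range] at hj
  by_cases hc : PySem.Set.contains ts (String.ofList ((c :: rest).take (j + 1))) = true
  · rw [if_pos hc, if_pos hc]
    apply pvWf_irrel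
    · simp only [List.length_drop, List.length_cons]; omega
    · exact le_rfl
  · rw [if_neg hc, if_neg hc]

-- generic shape of both inner loops ('total += x if cond')
theorem pvFoldl_ite_add {α : Type} (l : List α) (p : α → Bool) (g : α → Int) (init : Int) :
    l.foldl (fun acc x => if p x then acc + g x else acc) init
      = init + (l.map (fun x => if p x then g x else 0)).sum := by
  induction l generalizing init with
  | nil => simp
  | cons x xs ih =>
    simp only [List.foldl_cons, List.map_cons, List.sum_cons]
    by_cases h : p x = true
    · rw [if_pos h, if_pos h, ih]; ring
    · rw [if_neg h, if_neg h, ih]; simp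

-- the shared sum over prefix lengths 1..len, written as A's and B's loops produce it
theorem pvSum_pyRange (ts : PySem.Set String) (c : Char) (rest : List Char) :
    ((PySem.List.pyRange 1 (((c :: rest).length : Int) + 1) 1).map (fun i =>
        if PySem.Set.contains ts (String.ofList ((c :: rest).take i.toNat)) then
          pvW ts ((c :: rest).drop i.toNat)
        else 0)).sum
      = pvW ts (c :: rest) := by
  rw [pvW_cons]
  have hm : ((((c :: rest).length : Int) + 1) - 1).toNat = (c :: rest).length := by omega
  rw [PySem.List.pyRange_one, hm, List.map_map]
  congr 1
  apply List.map_congr_left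
  intro j hj
  simp only [List.mem_range] at hj
  have h1 : ((1 : Int) + (j : Int)).toNat = j + 1 := by omega
  simp only [Function.comp_apply, h1]

-- ===== B side =====
theorem pvTailCounts_eq (ts : PySem.Set String) (cs : List Char) :
    pvTailCounts ts cs = (List.range (cs.length + 1)).map (fun k => pvW ts (cs.drop k)) := by
  induction cs with
  | nil => simp [pvTailCounts]; rfl
  | cons c rest ih =>
    have hRHS : (List.range ((c :: rest).length + 1)).map (fun k => pvW ts ((c :: rest).drop k))
        = pvW ts (c :: rest) :: (List.range (rest.length + 1)).map (fun k => pvW ts (rest.drop k)) := by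
      rw [List.length_cons, List.range_succ_eq_map, List.map_cons, List.map_map]
      simp [Function.comp_def]
    rw [hRHS]
    simp only [pvTailCounts, ih]
    congr 1
    -- head: ways = pvW ts (c :: rest)
    rw [pvFoldl_ite_add, zero_add]
    rw [← pvSum_pyRange ts c rest]
    congr 1
    apply List.map_congr_left
    intro i hi
    rw [PySem.List.mem_pyRange_one] at hi
    have h0 : (0 : Int) ≤ i := by omega
    rw [PySem.List.slice_to _ h0]
    have h3 : ((List.range (rest.length + 1)).map (fun k => pvW ts (rest.drop k)))[i.toNat - 1]?
        = some (pvW ts (rest.drop (i.toNat - 1))) := by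
      rw [List.getElem?_map, List.getElem?_range (by simp only [List.length_cons] at hi; omega)]
      rfl
    have h4 : PySem.List.pyGet? ((List.range (rest.length + 1)).map (fun k => pvW ts (rest.drop k)))
        (i - 1) = some (pvW ts (rest.drop (i.toNat - 1))) := by
      have h5 : i - 1 = ((i.toNat - 1 : Nat) : Int) := by omega
      rw [h5, PySem.List.pyGet?_natCast, h3]
    rw [h4]
    have h7 : i.toNat = (i.toNat - 1) + 1 := by omega
    have h6 : (c :: rest).drop i.toNat = rest.drop (i.toNat - 1) := by
      conv_lhs => rw [h7]
      exact List.drop_succ_cons ..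
    by_cases hc : PySem.Set.contains ts (String.ofList ((c :: rest).take i.toNat)) = true
    · rw [if_pos hc, if_pos hc, h6]; rfl
    · rw [if_neg hc, if_neg hc]

theorem pvTailCounts_head (ts : PySem.Set String) (cs : List Char) :
    (pvTailCounts ts cs).headD 0 = pvW ts cs := by
  rw [pvTailCounts_eq, List.range_succ_eq_map]
  simp

-- ===== A side =====
-- memo invariant: every stored value is the true count of its key
def pvGood (ts : PySem.Set String) (memo : PySem.Dict String Int) : Prop :=
  ∀ k v, memo.get? k = some v → v = pvW ts k.toList

theorem pvDfsALoop_correct (ts : PySem.Set String) (fuel' : Nat)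
    (IH : ∀ (memo : PySem.Dict String Int) (s : String), s.toList.length ≤ fuel' → pvGood ts memo →
      (pvDfsA ts fuel' memo s).1 = pvW ts s.toList ∧ pvGood ts (pvDfsA ts fuel' memo s).2)
    (remaining : String) (hlen : remaining.toList.length ≤ fuel' + 1) :
    ∀ (is : List Int), (∀ i ∈ is, 1 ≤ i ∧ i ≤ (remaining.toList.length : Int)) →
    ∀ (total : Int) (memo : PySem.Dict String Int), pvGood ts memo →
      (pvDfsALoop ts fuel' remaining is total memo).1
        = total + (is.map (fun i =>
            if PySem.Set.contains ts (String.ofList (remaining.toList.take i.toNat)) then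
              pvW ts (remaining.toList.drop i.toNat) else 0)).sum
      ∧ pvGood ts (pvDfsALoop ts fuel' remaining is total memo).2 := by
  intro is
  induction is with
  | nil =>
    intro _ total memo hg
    rw [pvDfsALoop.eq_def]
    exact ⟨by simp, hg⟩
  | cons i rest ihr =>
    intro hmem total memo hg
    obtain ⟨hi1, hi2⟩ := hmem i List.mem_cons_self
    have h0 : (0 : Int) ≤ i := by omega
    have hs1 : PySem.Str.slice remaining none (some i)
        = String.ofList (remaining.toList.take i.toNat) := by
      simp [PySem.Str.slice, PySem.List.slice_to _ h0]
    have hs2 : (PySem.Str.slice remaining (some i) none).toList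
        = remaining.toList.drop i.toNat := by
      simp [PySem.Str.slice, PySem.List.slice_from _ h0]
    rw [pvDfsALoop.eq_def]
    dsimp only
    by_cases hc : PySem.Set.contains ts (PySem.Str.slice remaining none (some i)) = true
    · rw [if_pos hc]
      have hIH := IH memo (PySem.Str.slice remaining (some i) none)
        (by rw [hs2, List.length_drop]; omega) hg
      have hrest := ihr (fun x hx => hmem x (List.mem_cons_of_mem _ hx))
        (total + (pvDfsA ts fuel' memo (PySem.Str.slice remaining (some i) none)).1)
        (pvDfsA ts fuel' memo (PySem.Str.slice remaining (some i) none)).2 hIH.2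
      refine ⟨?_, hrest.2⟩
      rw [hrest.1, hIH.1, hs2]
      rw [hs1] at hc
      simp only [List.map_cons, List.sum_cons, if_pos hc]
      ring
    · rw [if_neg hc]
      have hrest := ihr (fun x hx => hmem x (List.mem_cons_of_mem _ hx)) total memo hg
      refine ⟨?_, hrest.2⟩
      rw [hrest.1]
      rw [hs1] at hc
      simp only [List.map_cons, List.sum_cons, if_neg hc]
      ring

theorem pvString_eq_empty_of_toList {s : String} (h : s.toList = []) : s = "" := by
  have := congrArg String.ofList h
  simpa using this

theorem pvDfsA_correct (ts : PySem.Set String) :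
    ∀ (fuel : Nat) (memo : PySem.Dict String Int) (s : String),
      s.toList.length ≤ fuel → pvGood ts memo →
      (pvDfsA ts fuel memo s).1 = pvW ts s.toList ∧ pvGood ts (pvDfsA ts fuel memo s).2 := by
  intro fuel
  induction fuel with
  | zero =>
    intro memo s hlen hg
    have hnil : s.toList = [] := List.eq_nil_of_length_eq_zero (Nat.le_zero.mp hlen)
    have hse : s = "" := pvString_eq_empty_of_toList hnil
    subst hse
    rw [pvDfsA.eq_def]
    dsimp only
    cases h : memo.get? "" with
    | some v =>
      exact ⟨hg "" v h, hg⟩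
    | none =>
      simp only [reduceIte]
      exact ⟨rfl, hg⟩
  | succ f ihf =>
    intro memo s hlen hg
    rw [pvDfsA.eq_def]
    dsimp only
    cases h : memo.get? s with
    | some v =>
      exact ⟨hg s v h, hg⟩
    | none =>
      by_cases hse : s = ""
      · subst hse
        simp only [reduceIte]
        exact ⟨rfl, hg⟩
      · rw [if_neg hse]
        dsimp only
        have hmem : ∀ i ∈ PySem.List.pyRange 1 ((s.toList.length : Int) + 1) 1,
            1 ≤ i ∧ i ≤ (s.toList.length : Int) := by
          intro i hi
          rw [PySem.List.mem_pyRange_one] at hi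
          omega
        have hloop := pvDfsALoop_correct ts f (ihf) s hlen _ hmem 0 memo hg
        have hne : s.toList ≠ [] := fun hnl => hse (pvString_eq_empty_of_toList hnl)
        obtain ⟨c, rest, hcr⟩ := List.exists_cons_of_ne_nil hne
        have hsum : (pvDfsALoop ts f s (PySem.List.pyRange 1 ((s.toList.length : Int) + 1) 1)
            0 memo).1 = pvW ts s.toList := by
          rw [hloop.1, zero_add]
          rw [hcr]
          exact pvSum_pyRange ts c rest
        refine ⟨hsum, ?_⟩
        intro k v hk
        by_cases hks : k = s
        · subst hks
          rw [PySem.Dict.get?_insert_self] at hk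
          rw [← Option.some_inj.mp hk, hsum]
        · rw [PySem.Dict.get?_insert_of_ne _ _ hks] at hk
          exact hloop.2 k v hk

theorem pvGood_empty (ts : PySem.Set String) : pvGood ts PySem.Dict.empty := by
  intro k v h
  simp [PySem.Dict.empty, PySem.Dict.get?] at h

-- ===== put together =====
theorem pvA_eq (towel_patterns designs : List String) :
    count_design_arrangements towel_patterns designs
      = (designs.map (fun d => pvW (PySem.Set.ofList towel_patterns) d.toList)).sum := by
  unfold count_design_arrangements
  dsimp only
  rw [PySem.List.foldl_congr_mem designs _ (fun total d =>
    total + pvW (PySem.Set.ofList towel_patterns) d.toList) 0 ?_]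
  · exact PySem.List.foldl_add designs _ 0 |>.trans (by rw [zero_add])
  · intro acc d _
    rw [(pvDfsA_correct (PySem.Set.ofList towel_patterns) d.toList.length PySem.Dict.empty d
      le_rfl (pvGood_empty _)).1]

theorem pvB_eq (towel_patterns designs : List String) :
    count_design_arrangements_alt towel_patterns designs
      = (designs.map (fun d => pvW (PySem.Set.ofList towel_patterns) d.toList)).sum := by
  unfold count_design_arrangements_alt
  dsimp only
  congr 1
  apply List.map_congr_left
  intro d _
  exact pvTailCounts_head _ _

-- ===== VERDICT (by name: the statement is the Claim_ definition above) =====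
theorem count_design_arrangements_spec : Claim_equal_count_design_arrangements := by
  intro tp ds _
  unfold Spec_count_design_arrangements
  rw [pvA_eq, pvB_eq]
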